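-- pv_equiv track=rewrite | github.com/STBneo/ADD2_yong | Tools/FAFDrugs2/bin_bak/GetRings.py | CountNeighborBondsInCluster
-- ===== SOURCE A (Python) =====
-- def CountNeighborBondsInCluster(dico_bond_junct, SystemRings):
--     """
--     Get the number of bonds involved in a cluster.
--     """
--
--     counter_list = {}
--
--     for i in range(0, len(SystemRings)):
--         counter = 0
--         for j in SystemRings[i]:
--             for k in SystemRings[i]:
--                 if k > j:
--                     list_temp = []
--                     list_temp.append(j)
--                     list_temp.append(k)
--                     list_temp.sort()
--                     for r in dico_bond_junct:
--                         pair = dico_bond_junct[r]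
--                         pair.sort()
--
--                         if list_temp == pair:
--                             counter = counter + 1
--                             break
--         counter_list[i] = counter
--     return counter_list
-- ===== SOURCE B (Python) =====
-- def CountNeighborBondsInCluster(dico_bond_junct, SystemRings):
--     """
--     Get the number of bonds involved in a cluster.
--     (Return value only: unlike the original, this does not sort the
--     dico_bond_junct lists in place.)
--     """
--     bonds = {(a, b)
--              for v in dico_bond_junct.values() if len(v) == 2
--              for (a, b) in (tuple(sorted(v)),) if a < b}
--     counter_list = {}
--     for i, ring in enumerate(SystemRings):
--         cnt = {}
--         for x in ring:
--             cnt[x] = cnt.get(x, 0) + 1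
--         counter_list[i] = sum(cnt.get(a, 0) * cnt.get(b, 0) for (a, b) in bonds)
--     return counter_list
-- ===== Notes on version B (the rewrite author's own statement) =====
-- stated objective: faster
-- what changed: Instead of enumerating all ordered atom pairs of each ring and rescanning (and re-sorting) every bond list for each pair, B precomputes the set of sorted two-element bond pairs once and, per ring, counts each bond pair weighted by the product of its endpoints' multiplicities in the ring.
import Mathlib
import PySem

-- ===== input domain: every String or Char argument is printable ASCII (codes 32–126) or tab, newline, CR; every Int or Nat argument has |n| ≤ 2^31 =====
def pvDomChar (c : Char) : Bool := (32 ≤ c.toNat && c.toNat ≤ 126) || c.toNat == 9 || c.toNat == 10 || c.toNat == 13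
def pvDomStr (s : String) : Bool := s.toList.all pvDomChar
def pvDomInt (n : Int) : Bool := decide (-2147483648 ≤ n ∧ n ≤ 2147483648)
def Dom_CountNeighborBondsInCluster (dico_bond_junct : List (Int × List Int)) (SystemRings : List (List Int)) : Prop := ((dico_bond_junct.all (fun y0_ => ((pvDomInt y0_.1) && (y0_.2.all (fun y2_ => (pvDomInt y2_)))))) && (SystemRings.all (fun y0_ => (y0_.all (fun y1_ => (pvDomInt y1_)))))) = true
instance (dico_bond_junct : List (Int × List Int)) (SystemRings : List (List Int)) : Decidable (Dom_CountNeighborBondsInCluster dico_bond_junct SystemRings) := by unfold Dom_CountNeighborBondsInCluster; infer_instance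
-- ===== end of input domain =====

-- B replaces A's per-ring O(|ring|^2 · |bonds|) pair enumeration by one precomputed set of
-- sorted bond pairs plus a per-ring multiplicity counter (objective: faster; return value only —
-- A also sorts the dico_bond_junct lists in place, B does not mutate its arguments).


-- ===== PORT A =====
-- the inner 'for r in dico_bond_junct: … if list_temp == pair: counter += 1; break' loop:
-- true iff some (freshly sorted) bond list equals lt (resorting an already-sorted list is a no-op,
-- so A's in-place sorts do not change the values compared)
def pvScanA (dico : List (Int × List Int)) (lt : List Int) : Bool :=
  match dico with
  | [] => false
  | (_, v) :: rest =>
    let pair := PySem.List.sorted v (fun x => x) false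
    if lt == pair then true else pvScanA rest lt

def CountNeighborBondsInCluster (dico_bond_junct : List (Int × List Int)) (SystemRings : List (List Int)) : List (Int × Int) :=
  ((PySem.List.pyRange 0 (SystemRings.length : Int) 1).foldl
    (fun (counter_list : PySem.Dict Int Int) i =>
      let ring := PySem.List.pyGetD SystemRings i []
      let counter := ring.foldl (fun c j =>
        ring.foldl (fun c k =>
          if k > j then
            let list_temp := PySem.List.sorted [j, k] (fun x => x) false
            if pvScanA dico_bond_junct list_temp then c + 1 else c
          else c) c) (0 : Int)
      counter_list.insert i counter)
    PySem.Dict.empty).items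

-- ===== PORT B =====
-- the set comprehension {(a,b) for v in values if len(v)==2 for (a,b) in (tuple(sorted(v)),) if a<b}
def pvBondsB (dico : List (Int × List Int)) : PySem.Set (Int × Int) :=
  PySem.Set.ofList
    (((dico.map (fun r => r.2)).filter (fun v => v.length == 2)).filterMap (fun v =>
      match PySem.List.sorted v (fun x => x) false with
      | [a, b] => if a < b then some (a, b) else none
      | _ => none))

def CountNeighborBondsInCluster_alt (dico_bond_junct : List (Int × List Int)) (SystemRings : List (List Int)) : List (Int × Int) :=
  let bonds := pvBondsB dico_bond_junct
  ((PySem.List.enumerate SystemRings 0).foldl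
    (fun (counter_list : PySem.Dict Int Int) p =>
      let cnt := p.2.foldl (fun (d : PySem.Dict Int Int) x => d.insert x (d.getD x 0 + 1)) PySem.Dict.empty
      counter_list.insert p.1 ((bonds.map (fun q => cnt.getD q.1 0 * cnt.getD q.2 0)).sum))
    PySem.Dict.empty).items

-- ===== PRECONDITION & SPEC =====
def Spec_CountNeighborBondsInCluster (dico_bond_junct : List (Int × List Int)) (SystemRings : List (List Int)) (out : List (Int × Int)) : Prop := out = CountNeighborBondsInCluster_alt dico_bond_junct SystemRings
instance (dico_bond_junct : List (Int × List Int)) (SystemRings : List (List Int)) (out : List (Int × Int)) : Decidable (Spec_CountNeighborBondsInCluster dico_bond_junct SystemRings out) := by unfold Spec_CountNeighborBondsInCluster; infer_instance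

-- ===== CLAIM (what is proved, stated in full; the proofs are below) =====
def Claim_equal_CountNeighborBondsInCluster : Prop := ∀ (dico_bond_junct : List (Int × List Int)) (SystemRings : List (List Int)), Dom_CountNeighborBondsInCluster dico_bond_junct SystemRings → Spec_CountNeighborBondsInCluster dico_bond_junct SystemRings (CountNeighborBondsInCluster dico_bond_junct SystemRings)

-- ===== LEMMAS AND PROOFS =====

theorem pvScanA_iff (d : List (Int × List Int)) (lt : List Int) :
    pvScanA d lt = true ↔ ∃ r ∈ d, PySem.List.sorted r.2 (fun x => x) false = lt := by
  induction d with
  | nil => simp [pvScanA]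
  | cons a t ih =>
    simp only [pvScanA]
    by_cases hc : lt = PySem.List.sorted a.2 (fun x => x) false
    · simp [hc]
    · simp only [List.mem_cons]
      constructor
      · intro hsc
        rcases ih.mp (by simpa [hc] using hsc) with ⟨r, hr, he⟩
        exact ⟨r, Or.inr hr, he⟩
      · rintro ⟨r, hr | hr, he⟩
        · subst hr; exact absurd he.symm hc
        · simp only [beq_iff_eq, hc, if_false]
          exact ih.mpr ⟨r, hr, he⟩

theorem pvBondsB_lt {d : List (Int × List Int)} {p : Int × Int} (hp : p ∈ pvBondsB d) :
    p.1 < p.2 := by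
  rw [pvBondsB, PySem.Set.mem_ofList, List.mem_filterMap] at hp
  rcases hp with ⟨v, _, hv⟩
  rcases hs : PySem.List.sorted v (fun x => x) false with _ | ⟨a, _ | ⟨b, _ | _⟩⟩ <;>
    simp [hs] at hv
  obtain ⟨hab, rfl⟩ := hv
  exact hab

theorem mem_pvBondsB {d : List (Int × List Int)} {j k : Int} (h : j < k) :
    ((j, k) ∈ pvBondsB d) ↔ pvScanA d [j, k] = true := by
  rw [pvScanA_iff, pvBondsB, PySem.Set.mem_ofList, List.mem_filterMap]
  constructor
  · rintro ⟨v, hv, hfv⟩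
    rw [List.mem_filter, List.mem_map] at hv
    rcases hv with ⟨⟨r, hr, hrv⟩, _⟩
    refine ⟨r, hr, ?_⟩
    rw [hrv]
    rcases hs : PySem.List.sorted v (fun x => x) false with _ | ⟨a, _ | ⟨b, _ | _⟩⟩ <;>
      simp [hs] at hfv
    rcases hfv with ⟨_, h1, h2⟩
    rw [h1, h2]
  · rintro ⟨r, hr, he⟩
    refine ⟨r.2, ?_, ?_⟩
    · rw [List.mem_filter]
      constructor
      · exact List.mem_map.mpr ⟨r, hr, rfl⟩
      · have := (PySem.List.sorted_perm r.2 (fun x => x) false).length_eq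
        rw [he] at this
        simpa using this.symm
    · rw [he]; simp [h]

theorem sum_map_if_eq (ring : List Int) (a c : Int) :
    (ring.map (fun j => if j = a then c else 0)).sum = (ring.count a : Int) * c := by
  induction ring with
  | nil => simp
  | cons x t ih =>
    by_cases hx : x = a
    · simp [hx, ih]; ring
    · simp [hx, ih]

theorem countP_or_disj {α : Type} (l : List α) (p q : α → Bool)
    (h : ∀ x ∈ l, ¬(p x = true ∧ q x = true)) :
    l.countP (fun x => p x || q x) = l.countP p + l.countP q := by
  induction l with
  | nil => simp
  | cons a t ih =>
    have ha := h a (by simp)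
    have ht : ∀ x ∈ t, ¬(p x = true ∧ q x = true) := fun x hx => h x (by simp [hx])
    simp only [List.countP_cons, ih ht]
    cases hp : p a <;> cases hq : q a <;> simp_all <;> omega

theorem pairSum (ring : List Int) (B : List (Int × Int)) (hB : B.Nodup) :
    (ring.map (fun j => ((ring.countP (fun k => decide ((j, k) ∈ B))) : Int))).sum
    = (B.map (fun p => ((ring.count p.1 : Int) * (ring.count p.2 : Int)))).sum := by
  induction B with
  | nil => simp
  | cons p B' ih =>
    rw [List.nodup_cons] at hB
    obtain ⟨hpB, hB'⟩ := hB
    have hsplit : ∀ j : Int, ring.countP (fun k => decide ((j, k) ∈ p :: B'))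
        = ring.countP (fun k => decide ((j, k) = p)) + ring.countP (fun k => decide ((j, k) ∈ B')) := by
      intro j
      rw [← countP_or_disj]
      · apply List.countP_congr
        intro k _
        simp [List.mem_cons]
      · intro k _ hk
        rcases hk with ⟨h1, h2⟩
        simp only [decide_eq_true_eq] at h1 h2
        exact hpB (h1 ▸ h2)
    have hfirst : ∀ j : Int, ((ring.countP (fun k => decide ((j, k) = p)) : Int))
        = if j = p.1 then (ring.count p.2 : Int) else 0 := by
      intro j
      by_cases hj : j = p.1
      · subst hj
        rw [if_pos rfl]
        norm_cast
        rw [List.count_eq_countP]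
        apply List.countP_congr
        intro k _
        simp [Prod.ext_iff]
      · rw [if_neg hj]
        norm_cast
        rw [List.countP_eq_zero]
        intro k _
        simp [Prod.ext_iff]
        intro h; exact absurd h hj
    calc (ring.map (fun j => ((ring.countP (fun k => decide ((j, k) ∈ p :: B'))) : Int))).sum
        = (ring.map (fun j => (if j = p.1 then (ring.count p.2 : Int) else 0)
            + ((ring.countP (fun k => decide ((j, k) ∈ B'))) : Int))).sum := by
          apply congrArg
          apply List.map_congr_left
          intro j _
          rw [hsplit j, ← hfirst j]
          push_cast
          ring
      _ = (ring.map (fun j => if j = p.1 then (ring.count p.2 : Int) else 0)).sum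
            + (ring.map (fun j => ((ring.countP (fun k => decide ((j, k) ∈ B'))) : Int))).sum := by
          rw [← List.sum_map_add]
      _ = (ring.count p.1 : Int) * (ring.count p.2 : Int)
            + ((B'.map (fun q => ((ring.count q.1 : Int) * (ring.count q.2 : Int)))).sum) := by
          rw [sum_map_if_eq, ih hB']
      _ = ((p :: B').map (fun q => ((ring.count q.1 : Int) * (ring.count q.2 : Int)))).sum := by
          simp

theorem sorted_pair {j k : Int} (h : j < k) :
    PySem.List.sorted [j, k] (fun x => x) false = [j, k] := by
  apply PySem.List.sorted_eq_self_of_pairwise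
  simp [List.pairwise_cons]; omega

theorem ring_counter_eq (d : List (Int × List Int)) (ring : List Int) :
    ring.foldl (fun c j => ring.foldl (fun c k =>
        if k > j then
          (if pvScanA d (PySem.List.sorted [j, k] (fun x => x) false) then c + 1 else c)
        else c) c) (0 : Int)
    = ((pvBondsB d).map (fun q =>
        (PySem.Dict.counter ring).getD q.1 0 * (PySem.Dict.counter ring).getD q.2 0)).sum := by
  have hinner : ∀ (j c : Int), ring.foldl (fun c k =>
        if k > j then
          (if pvScanA d (PySem.List.sorted [j, k] (fun x => x) false) then c + 1 else c)
        else c) c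
      = c + ((ring.countP (fun k => decide ((j, k) ∈ pvBondsB d))) : Int) := by
    intro j c
    rw [PySem.List.foldl_congr_mem'
        (g := fun c k => if (j, k) ∈ pvBondsB d then c + 1 else c)]
    · exact PySem.List.foldl_ite_add_one _ _ _
    · intro k _ c
      by_cases hk : k > j
      · rw [if_pos hk, sorted_pair hk]
        by_cases hm : (j, k) ∈ pvBondsB d
        · rw [if_pos hm, if_pos ((mem_pvBondsB hk).mp hm)]
        · rw [if_neg hm, if_neg (fun hs => hm ((mem_pvBondsB hk).mpr hs))]
      · rw [if_neg hk, if_neg (fun hm => hk (pvBondsB_lt hm))]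
  have houter : ring.foldl (fun c j => ring.foldl (fun c k =>
        if k > j then
          (if pvScanA d (PySem.List.sorted [j, k] (fun x => x) false) then c + 1 else c)
        else c) c) (0 : Int)
      = ring.foldl (fun c j => c + ((ring.countP (fun k => decide ((j, k) ∈ pvBondsB d))) : Int)) (0 : Int) :=
    PySem.List.foldl_congr_mem' _ _ _ _ (fun j _ c => hinner j c)
  rw [houter,
    PySem.List.foldl_add, zero_add,
    pairSum ring (pvBondsB d) (PySem.Set.nodup_ofList _)]
  apply congrArg
  apply List.map_congr_left
  intro q _
  rw [PySem.Dict.getD_counter, PySem.Dict.getD_counter]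


-- per-ring counters, named so the top-level folds can be rewritten
def pvCntA (d : List (Int × List Int)) (ring : List Int) : Int :=
  ring.foldl (fun c j => ring.foldl (fun c k =>
      if k > j then
        (if pvScanA d (PySem.List.sorted [j, k] (fun x => x) false) then c + 1 else c)
      else c) c) (0 : Int)

def pvCntB (d : List (Int × List Int)) (ring : List Int) : Int :=
  ((pvBondsB d).map (fun q =>
    (ring.foldl (fun (m : PySem.Dict Int Int) x => m.insert x (m.getD x 0 + 1)) PySem.Dict.empty).getD q.1 0
      * (ring.foldl (fun (m : PySem.Dict Int Int) x => m.insert x (m.getD x 0 + 1)) PySem.Dict.empty).getD q.2 0)).sum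

theorem pvCnt_eq (d : List (Int × List Int)) (ring : List Int) : pvCntA d ring = pvCntB d ring := by
  unfold pvCntA pvCntB
  rw [PySem.Dict.foldl_insert_getD_add_one_eq_counter]
  exact ring_counter_eq d ring

theorem pyRange_nodup (n : Nat) : (PySem.List.pyRange 0 (n : Int) 1).Nodup := by
  rw [PySem.List.pyRange_zero_natCast]
  exact List.nodup_range.map (fun a b h => by exact_mod_cast h)

-- ===== VERDICT (by name: the statement is the Claim_ definition above) =====
theorem CountNeighborBondsInCluster_spec : Claim_equal_CountNeighborBondsInCluster := by
  intro d S _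
  unfold Spec_CountNeighborBondsInCluster CountNeighborBondsInCluster CountNeighborBondsInCluster_alt
  show (List.foldl (fun (cl : PySem.Dict Int Int) i =>
          cl.insert i (pvCntA d (PySem.List.pyGetD S i [])))
        PySem.Dict.empty (PySem.List.pyRange 0 (S.length : Int) 1)).items
      = (List.foldl (fun (cl : PySem.Dict Int Int) p => cl.insert p.1 (pvCntB d p.2))
        PySem.Dict.empty (PySem.List.enumerate S 0)).items
  rw [PySem.Dict.items_foldl_insert_fresh _ (fun i => i)
        (fun i => pvCntA d (PySem.List.pyGetD S i [])) _
        (fun a _ => PySem.Dict.contains_empty a)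
        (by simpa using pyRange_nodup S.length),
      PySem.List.enumerate_eq_map_pyRange S ([] : List Int)]
  have e2 := PySem.Dict.items_foldl_insert_fresh
      (List.map (fun j => (j, PySem.List.pyGetD S j [])) (PySem.List.pyRange 0 (PySem.List.len S) 1))
      (fun p => p.1) (fun p => pvCntB d p.2) (PySem.Dict.empty : PySem.Dict Int Int)
      (fun a _ => PySem.Dict.contains_empty a.1)
      (by
        rw [← PySem.List.enumerate_eq_map_pyRange S ([] : List Int),
          PySem.List.map_fst_enumerate, zero_add]
        exact pyRange_nodup S.length)
  rw [e2, List.map_map]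
  show [] ++ _ = [] ++ _
  rw [List.nil_append, List.nil_append]
  apply List.map_congr_left
  intro i _
  simp only [Function.comp]
  rw [pvCnt_eq]
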